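-- pv_equiv track=rewrite | github.com/exleya/advent_of_code | 2020/day4.py | valhair
-- ===== SOURCE A (Python) =====
-- def valhair(hairstr):
--     if len(hairstr) != 7:
--         return False
--     if hairstr[0] != '#':
--         return False
--
--     for c in hairstr[1:]:
--         if c not in '1234567890abcdefg':
--             return False
--     return True
-- ===== SOURCE B (Python) =====
-- import re
--
-- _HAIR_RE = re.compile(r'#[0-9a-g]{6}')
--
--
-- def valhair(hairstr):
--     # One regex fullmatch replaces the length check, the '#' guard and the
--     # per-character loop.  The class deliberately reads [0-9a-g]: the source
--     # accepts 'g' as a digit, and that is reproduced exactly.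
--     return bool(_HAIR_RE.fullmatch(hairstr))
-- ===== Notes on version B (the rewrite author's own statement) =====
-- stated objective: idiomatic
-- what changed: Replaced the explicit length/first-char guards and the per-character membership loop by a single precompiled regular-expression fullmatch of the pattern #[0-9a-g]{6}.
import Mathlib
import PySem

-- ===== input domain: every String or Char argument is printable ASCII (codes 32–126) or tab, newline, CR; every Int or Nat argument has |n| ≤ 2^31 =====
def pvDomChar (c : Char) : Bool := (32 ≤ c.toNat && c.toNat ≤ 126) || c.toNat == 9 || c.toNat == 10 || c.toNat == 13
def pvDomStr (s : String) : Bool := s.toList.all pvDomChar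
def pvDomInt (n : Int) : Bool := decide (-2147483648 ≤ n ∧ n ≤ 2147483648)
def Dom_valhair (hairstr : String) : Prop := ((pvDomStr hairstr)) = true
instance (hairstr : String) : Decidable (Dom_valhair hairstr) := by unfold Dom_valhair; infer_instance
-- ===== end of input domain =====

-- B replaces A's explicit guards and per-character loop by one regex fullmatch of '#[0-9a-g]{6}' (same value on every string).

-- ===== PORT A =====
-- the 'for c in hairstr[1:]' loop with its early 'return False'
def valhairLoopA : List Char → Bool
  | [] => true
  | c :: rest =>
      if ¬ (PySem.Chars.isIn [c] "1234567890abcdefg".toList) then false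
      else valhairLoopA rest

def valhair (hairstr : String) : Bool :=
  if PySem.Str.len hairstr ≠ 7 then false
  else if PySem.List.pyGet? hairstr.toList 0 ≠ some '#' then false
  else valhairLoopA (PySem.List.slice hairstr.toList (some 1) none)

-- ===== PORT B =====
-- Hand port of re.fullmatch(r'#[0-9a-g]{6}', s), exact for this pattern (no
-- backtracking is possible in it): a literal '#', then exactly six characters
-- of the class [0-9a-g], and fullmatch demands that nothing remains.
def reClassB (c : Char) : Bool := ('0' ≤ c && c ≤ '9') || ('a' ≤ c && c ≤ 'g')

-- consume the literal character c
def reLitB (c : Char) : List Char → Option (List Char)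
  | d :: rest => if d = c then some rest else none
  | [] => none

-- consume exactly n characters of the class [0-9a-g]
def reRepB : Nat → List Char → Option (List Char)
  | 0, cs => some cs
  | _ + 1, [] => none
  | n + 1, c :: cs => if reClassB c then reRepB n cs else none

def valhair_alt (hairstr : String) : Bool :=
  match (reLitB '#' hairstr.toList).bind (reRepB 6) with
  | some [] => true        -- fullmatch: the whole string was consumed
  | _ => false

-- ===== PRECONDITION & SPEC =====
def Spec_valhair (hairstr : String) (out : Bool) : Prop := out = valhair_alt hairstr
instance (hairstr : String) (out : Bool) : Decidable (Spec_valhair hairstr out) := by unfold Spec_valhair; infer_instance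

-- ===== CLAIM (what is proved, stated in full; the proofs are below) =====
def Claim_equal_valhair : Prop := ∀ (hairstr : String), Dom_valhair hairstr → Spec_valhair hairstr (valhair hairstr)

-- ===== LEMMAS AND PROOFS =====

theorem char_eq_of_toNat_eq (c d : Char) (h : c.toNat = d.toNat) : c = d :=
  Char.ext (UInt32.toNat_inj.mp h)

theorem digits_toList : "1234567890abcdefg".toList =
    ['1','2','3','4','5','6','7','8','9','0','a','b','c','d','e','f','g'] := rfl

-- membership in A's digit string coincides with B's character class [0-9a-g]
theorem isIn_class_eq (c : Char) :
    PySem.Chars.isIn [c] "1234567890abcdefg".toList = reClassB c := by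
  rcases h : reClassB c with _ | _
  · rw [PySem.Chars.isIn_eq_false_iff, List.singleton_infix_iff, digits_toList]
    intro hmem
    simp only [List.mem_cons, List.not_mem_nil, or_false] at hmem
    revert h
    rcases hmem with rfl|rfl|rfl|rfl|rfl|rfl|rfl|rfl|rfl|rfl|rfl|rfl|rfl|rfl|rfl|rfl|rfl <;> decide
  · rw [PySem.Chars.isIn_iff_infix, List.singleton_infix_iff, digits_toList]
    simp only [reClassB, Bool.or_eq_true, Bool.and_eq_true, decide_eq_true_eq] at h
    have key : ∀ a b : Char, a ≤ b → a.toNat ≤ b.toNat := by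
      intro a b hab
      exact UInt32.le_iff_toNat_le.mp (Char.le_def.mp hab)
    have hx : (48 ≤ c.toNat ∧ c.toNat ≤ 57) ∨ (97 ≤ c.toNat ∧ c.toNat ≤ 103) := by
      rcases h with ⟨h1, h2⟩ | ⟨h1, h2⟩
      · exact Or.inl ⟨key _ _ h1, key _ _ h2⟩
      · exact Or.inr ⟨key _ _ h1, key _ _ h2⟩
    have hd : c.toNat = 48 ∨ c.toNat = 49 ∨ c.toNat = 50 ∨ c.toNat = 51 ∨ c.toNat = 52 ∨
        c.toNat = 53 ∨ c.toNat = 54 ∨ c.toNat = 55 ∨ c.toNat = 56 ∨ c.toNat = 57 ∨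
        c.toNat = 97 ∨ c.toNat = 98 ∨ c.toNat = 99 ∨ c.toNat = 100 ∨ c.toNat = 101 ∨
        c.toNat = 102 ∨ c.toNat = 103 := by omega
    rcases hd with h1|h1|h1|h1|h1|h1|h1|h1|h1|h1|h1|h1|h1|h1|h1|h1|h1
    · rw [char_eq_of_toNat_eq c '0' (h1.trans rfl)]; decide
    · rw [char_eq_of_toNat_eq c '1' (h1.trans rfl)]; decide
    · rw [char_eq_of_toNat_eq c '2' (h1.trans rfl)]; decide
    · rw [char_eq_of_toNat_eq c '3' (h1.trans rfl)]; decide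
    · rw [char_eq_of_toNat_eq c '4' (h1.trans rfl)]; decide
    · rw [char_eq_of_toNat_eq c '5' (h1.trans rfl)]; decide
    · rw [char_eq_of_toNat_eq c '6' (h1.trans rfl)]; decide
    · rw [char_eq_of_toNat_eq c '7' (h1.trans rfl)]; decide
    · rw [char_eq_of_toNat_eq c '8' (h1.trans rfl)]; decide
    · rw [char_eq_of_toNat_eq c '9' (h1.trans rfl)]; decide
    · rw [char_eq_of_toNat_eq c 'a' (h1.trans rfl)]; decide
    · rw [char_eq_of_toNat_eq c 'b' (h1.trans rfl)]; decide
    · rw [char_eq_of_toNat_eq c 'c' (h1.trans rfl)]; decide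
    · rw [char_eq_of_toNat_eq c 'd' (h1.trans rfl)]; decide
    · rw [char_eq_of_toNat_eq c 'e' (h1.trans rfl)]; decide
    · rw [char_eq_of_toNat_eq c 'f' (h1.trans rfl)]; decide
    · rw [char_eq_of_toNat_eq c 'g' (h1.trans rfl)]; decide

-- A's loop is an 'all' over B's class
theorem loopA_eq_all (cs : List Char) : valhairLoopA cs = cs.all reClassB := by
  induction cs with
  | nil => rfl
  | cons c rest ih =>
      simp only [valhairLoopA, isIn_class_eq, List.all_cons, ih]
      cases reClassB c <;> simp

-- B's bounded repetition succeeds on the whole input iff the length is n and every char is in the class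
theorem reRepB_eq_some_nil (n : Nat) (cs : List Char) :
    reRepB n cs = some [] ↔ cs.length = n ∧ cs.all reClassB = true := by
  induction cs generalizing n with
  | nil => cases n <;> simp [reRepB]
  | cons c rest ih =>
      cases n with
      | zero => simp [reRepB]
      | succ m =>
          rcases hc : reClassB c with _ | _ <;>
            simp [reRepB, hc, ih m, and_comm]

-- the two ports agree on every string
theorem valhair_eq_alt (s : String) : valhair s = valhair_alt s := by
  unfold valhair valhair_alt
  rcases hl : s.toList with _ | ⟨c, rest⟩
  · simp [PySem.Str.len_eq, hl, reLitB]
  · by_cases hc : c = '#'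
    · subst hc
      have hlit : reLitB '#' ('#' :: rest) = some rest := by simp [reLitB]
      have hget : PySem.List.pyGet? ('#' :: rest) 0 = some '#' := PySem.List.pyGet?_zero_cons ..
      by_cases h7 : rest.length = 6
      · simp only [PySem.Str.len_eq, hl, List.length_cons, h7, hlit, hget,
          PySem.List.slice_from_one, List.tail_cons]
        rw [if_neg (by norm_num), if_neg (by simp),
          show ((some rest).bind fun a => reRepB 6 a) = reRepB 6 rest from rfl]
        rcases hr : reRepB 6 rest with _ | ⟨_ | ⟨d, ds⟩⟩
        · show valhairLoopA rest = false
          rcases hall : rest.all reClassB with _ | _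
          · rw [loopA_eq_all, hall]
          · exact absurd (((reRepB_eq_some_nil 6 rest).mpr ⟨h7, hall⟩).symm.trans hr)
              (by simp)
        · show valhairLoopA rest = true
          rw [loopA_eq_all, ((reRepB_eq_some_nil 6 rest).mp hr).2]
        · show valhairLoopA rest = false
          rcases hall : rest.all reClassB with _ | _
          · rw [loopA_eq_all, hall]
          · exact absurd (((reRepB_eq_some_nil 6 rest).mpr ⟨h7, hall⟩).symm.trans hr)
              (by simp)
      · simp only [PySem.Str.len_eq, hl, List.length_cons, hlit]
        rw [if_pos (by push_cast; omega),
          show ((some rest).bind fun a => reRepB 6 a) = reRepB 6 rest from rfl]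
        rcases hr : reRepB 6 rest with _ | ⟨_ | ⟨d, ds⟩⟩
        · rfl
        · exact absurd ((reRepB_eq_some_nil 6 rest).mp hr).1 h7
        · rfl
    · have hlit : reLitB '#' (c :: rest) = none := by simp [reLitB, hc]
      have hget : PySem.List.pyGet? (c :: rest) 0 = some c := PySem.List.pyGet?_zero_cons ..
      simp only [PySem.Str.len_eq, hl, hlit, hget, show (Option.none.bind fun a => reRepB 6 a) = none from rfl]
      split_ifs with h1 h2
      · rfl
      · rfl
      · exact absurd (Option.some.injEq .. ▸ (not_not.mp h2)) hc

-- ===== VERDICT (by name: the statement is the Claim_ definition above) =====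
theorem valhair_spec : Claim_equal_valhair := by
  intro s _
  exact valhair_eq_alt s
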